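-- pv_equiv track=rewrite | github.com/pro-shridhar/python_dirs | Day_21/challeng/consecutive.py | consecutive_combo
-- ===== SOURCE A (Python) =====
-- def consecutive_combo(lst1, lst2):
--
--     lst = lst1 + lst2
--     min_val = min(lst)
--     # max_val = max(lst)
--
--     for i in lst:
--         if min_val not in lst:
--             return False
--
--         min_val += 1
--     return True
-- ===== SOURCE B (Python) =====
-- def consecutive_combo(lst1, lst2):
--     lst = sorted(lst1 + lst2)
--     return all(lst[i] == lst[0] + i for i in range(len(lst)))
-- ===== Notes on version B (the rewrite author's own statement) =====
-- stated objective: alternative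
-- what changed: B sorts the combined list once and checks it equals the consecutive run starting at its first element, replacing A's per-iteration linear membership scans; on adversarial inputs this avoids A's quadratic worst case, though A's early exit makes typical timings comparable.
import Mathlib
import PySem

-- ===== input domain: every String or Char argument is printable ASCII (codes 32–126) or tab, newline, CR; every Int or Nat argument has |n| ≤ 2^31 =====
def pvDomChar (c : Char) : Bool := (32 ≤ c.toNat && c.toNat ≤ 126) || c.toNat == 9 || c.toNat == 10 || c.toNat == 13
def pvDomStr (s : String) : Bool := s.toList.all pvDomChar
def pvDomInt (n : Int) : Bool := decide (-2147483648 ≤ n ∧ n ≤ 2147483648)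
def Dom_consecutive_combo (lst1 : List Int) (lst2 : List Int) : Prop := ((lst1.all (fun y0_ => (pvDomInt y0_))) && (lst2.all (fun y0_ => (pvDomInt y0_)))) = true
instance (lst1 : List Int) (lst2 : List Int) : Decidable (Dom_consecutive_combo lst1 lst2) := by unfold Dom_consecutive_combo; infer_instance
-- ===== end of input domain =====

-- B sorts the combined list once and checks it equals the consecutive run from its first element,
-- instead of A's per-iteration membership scans (objective: alternative algorithm, same measured cost).


-- ===== PORT A =====
-- A's for-loop: one iteration per element of lst; early return False when min_val is absent.
def consecALoop (lst : List Int) : List Int → Int → Bool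
  | [], _ => true
  | _ :: rest, mv => if ¬ (lst.contains mv) then false else consecALoop lst rest (mv + 1)

def consecutive_combo (lst1 : List Int) (lst2 : List Int) : Bool :=
  let lst := lst1 ++ lst2
  match PySem.List.min? lst (fun x => x) with
  | none => false   -- Python: min([]) raises ValueError; excluded by Pre_
  | some min_val => consecALoop lst lst min_val

-- ===== PORT B =====
def consecutive_combo_alt (lst1 : List Int) (lst2 : List Int) : Bool :=
  let lst := PySem.List.sorted (lst1 ++ lst2) (fun x => x) false
  (List.range lst.length).all (fun i => lst.getD i 0 == lst.getD 0 0 + (i : Int))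

-- ===== PRECONDITION & SPEC =====
-- Pre_ excludes only the empty combined list, on which Python A raises ValueError (min of empty sequence).
def Pre_consecutive_combo (lst1 : List Int) (lst2 : List Int) : Prop := lst1 ++ lst2 ≠ []
instance (lst1 : List Int) (lst2 : List Int) : Decidable (Pre_consecutive_combo lst1 lst2) := by unfold Pre_consecutive_combo; infer_instance
def pvWitness_consecutive_combo : List Int × List Int := ([1, 3], [2])

def Spec_consecutive_combo (lst1 : List Int) (lst2 : List Int) (out : Bool) : Prop := out = consecutive_combo_alt lst1 lst2
instance (lst1 : List Int) (lst2 : List Int) (out : Bool) : Decidable (Spec_consecutive_combo lst1 lst2 out) := by unfold Spec_consecutive_combo; infer_instance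

-- ===== CLAIM (what is proved, stated in full; the proofs are below) =====
def Claim_equal_consecutive_combo : Prop := ∀ (lst1 : List Int) (lst2 : List Int), Dom_consecutive_combo lst1 lst2 → Pre_consecutive_combo lst1 lst2 → Spec_consecutive_combo lst1 lst2 (consecutive_combo lst1 lst2)

-- ===== LEMMAS AND PROOFS =====

-- A's loop succeeds iff every value min_val, min_val+1, ... (one per remaining iteration) is in lst.
theorem consecALoop_eq_true_iff (lst : List Int) (iters : List Int) (mv : Int) :
    consecALoop lst iters mv = true ↔ ∀ k : Nat, k < iters.length → (mv + (k : Int)) ∈ lst := by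
  induction iters generalizing mv with
  | nil => simp [consecALoop]
  | cons x rest ih =>
    cases hc : lst.contains mv with
    | false =>
      constructor
      · intro h
        simp only [consecALoop] at h
        rw [if_pos (by rw [hc]; simp)] at h
        cases h
      · intro hall
        have h0 : mv ∈ lst := by simpa using hall 0 (by simp)
        have hc' := List.contains_iff_mem.mpr h0
        rw [hc] at hc'; cases hc'
    | true =>
      have hmem : mv ∈ lst := List.contains_iff_mem.mp hc
      have hred : consecALoop lst (x :: rest) mv = consecALoop lst rest (mv + 1) := by
        show (if ¬ (lst.contains mv) then false else consecALoop lst rest (mv + 1)) = _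
        rw [if_neg (by rw [hc]; simp)]
      rw [hred, ih, List.length_cons]
      constructor
      · intro hall k hk
        cases k with
        | zero => simpa using hmem
        | succ j =>
          have := hall j (by omega)
          have he : mv + 1 + (j : Int) = mv + ((j + 1 : Nat) : Int) := by push_cast; ring
          rw [he] at this; exact this
      · intro hall k hk
        have := hall (k + 1) (by omega)
        have he : mv + ((k + 1 : Nat) : Int) = mv + 1 + (k : Int) := by push_cast; ring
        rwa [he] at this

-- B succeeds iff the sorted list is s[0], s[0]+1, ...
theorem altB_eq_true_iff (s : List Int) :
    ((List.range s.length).all (fun i => s.getD i 0 == s.getD 0 0 + (i : Int))) = true ↔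
      ∀ i : Nat, i < s.length → s.getD i 0 = s.getD 0 0 + (i : Int) := by
  simp [List.all_eq_true, List.mem_range]

theorem consecutive_combo_spec : Claim_equal_consecutive_combo := by
  intro lst1 lst2 _ hpre
  unfold Pre_consecutive_combo at hpre
  unfold Spec_consecutive_combo consecutive_combo consecutive_combo_alt
  set lst := lst1 ++ lst2 with hlst
  obtain ⟨m, hm⟩ : ∃ m, PySem.List.min? lst (fun x => x) = some m := by
    cases hmin : PySem.List.min? lst (fun x => x) with
    | none => exact absurd ((PySem.List.min?_eq_none_iff lst (fun x => x)).mp hmin) hpre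
    | some m => exact ⟨m, rfl⟩
  simp only [hm]
  have hmMem : m ∈ lst := PySem.List.min?_mem hm
  have hmMin : ∀ y ∈ lst, m ≤ y := by
    intro y hy; simpa using PySem.List.min?_isMin hm y hy
  set s := PySem.List.sorted lst (fun x => x) false with hs
  have hperm : s.Perm lst := PySem.List.sorted_perm lst (fun x => x) false
  have hlen : s.length = lst.length := hperm.length_eq
  have hpos : 0 < lst.length := List.length_pos_iff.mpr hpre
  have hsne : s ≠ [] := by rw [← List.length_pos_iff]; omega
  obtain ⟨h0, t, hst⟩ := List.exists_cons_of_ne_nil hsne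
  have hheadMem : h0 ∈ lst := hperm.mem_iff.mp (by simp [hst])
  have hheadLe : ∀ y ∈ lst, h0 ≤ y := by
    intro y hy
    simpa using PySem.List.key_head_sorted_le lst (fun x => x) (by rw [← hst, hs]) y hy
  have hhead0 : s.getD 0 0 = h0 := by simp [hst]
  have hh0m : h0 = m := le_antisymm (hheadLe m hmMem) (hmMin h0 hheadMem)
  have hAiff := consecALoop_eq_true_iff lst lst m
  have hBiff := altB_eq_true_iff s
  have hiff : consecALoop lst lst m = true ↔
      ((List.range s.length).all (fun i => s.getD i 0 == s.getD 0 0 + (i : Int))) = true := by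
    rw [hAiff, hBiff]
    constructor
    · -- all m+k present → sorted is exactly the run
      intro hall
      set ys : List Int := (List.range lst.length).map (fun i : Nat => m + (i : Int)) with hys
      have hysnd : ys.Nodup := by
        refine List.Nodup.map ?_ List.nodup_range
        intro a b hab; simp at hab; omega
      have hyssub : ys ⊆ lst := by
        intro y hy
        simp only [hys, List.mem_map, List.mem_range] at hy
        obtain ⟨i, hi, rfl⟩ := hy
        exact hall i hi
      have hyslen : ys.length = lst.length := by simp [hys]
      have hpermys : ys.Perm lst := (hysnd.subperm hyssub).perm_of_length_le (by omega)
      have hyspw : ys.Pairwise (fun a b => (fun x : Int => x) a < (fun x : Int => x) b) := by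
        simp only [hys]
        refine List.Pairwise.map _ ?_ List.pairwise_lt_range
        intro a b hab; simpa using hab
      have hseq : s = ys := by
        rw [hs]; exact PySem.List.sorted_eq_of_perm_of_pairwise_lt lst ys (fun x => x) hpermys hyspw
      intro i hi
      rw [hseq] at hi ⊢
      simp only [hys, List.length_map, List.length_range] at hi
      simp [hys, List.getD_eq_getElem?_getD, hi, hpos]
    · -- sorted is the run → all m+k present
      intro hrun k hk
      have hk' : k < s.length := by omega
      have hv := hrun k hk'
      rw [hhead0, hh0m] at hv
      have hmem : (m + (k : Int)) ∈ s := by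
        rw [← hv]
        have hg : s.getD k 0 = s[k]'hk' := by
          simp [List.getD_eq_getElem?_getD, List.getElem?_eq_getElem hk']
        rw [hg]; exact List.getElem_mem _
      exact hperm.mem_iff.mp hmem
  cases hA : consecALoop lst lst m with
  | true => exact (hiff.mp hA).symm
  | false =>
    cases hB : ((List.range s.length).all (fun i => s.getD i 0 == s.getD 0 0 + (i : Int))) with
    | true => exact absurd (hiff.mpr hB) (by simp [hA])
    | false => rfl

-- ===== VERDICT (by name: the statement is the Claim_ definition above) =====
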